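-- pv_equiv track=rewrite | github.com/juho5005/Programmers | Lv_1_OrderBy/49_폰켓몬.py | solution
-- ===== SOURCE A (Python) =====
-- def solution(nums):
--     l = len(nums) // 2 # 뽑아야 하는 포켓몬의 개수
--
--     dic = {} # 딕셔너리 생성
--
--     not_duplicated_nums = list(set(nums))
--
--     res = 0
--     for elem in not_duplicated_nums :
--         if l == res :
--             break
--
--         if elem not in dic :
--             dic[elem] = 0
--             res += 1
--         else :
--             break
--     return res
-- ===== SOURCE B (Python) =====
-- def solution(nums):
--     return min(len(nums) // 2, len(set(nums)))
-- ===== Notes on version B (the rewrite author's own statement) =====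
-- stated objective: simpler
-- what changed: Replaced A's set-build plus dict-and-break counting loop with the closed form min(len(nums)//2, len(set(nums))).
import Mathlib
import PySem

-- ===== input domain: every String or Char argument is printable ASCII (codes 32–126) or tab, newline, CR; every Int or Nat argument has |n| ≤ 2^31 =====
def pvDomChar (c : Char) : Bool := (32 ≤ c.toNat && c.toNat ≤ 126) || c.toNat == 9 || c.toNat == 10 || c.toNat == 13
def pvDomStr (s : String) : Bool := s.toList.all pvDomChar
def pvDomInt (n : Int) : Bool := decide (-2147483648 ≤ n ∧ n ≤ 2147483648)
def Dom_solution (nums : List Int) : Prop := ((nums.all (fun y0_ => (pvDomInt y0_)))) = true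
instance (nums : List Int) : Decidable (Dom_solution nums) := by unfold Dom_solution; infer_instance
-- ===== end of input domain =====

-- B replaces A's set-build plus dict-and-break counting loop with the closed form
-- min(len(nums)//2, len(set(nums))); objective: simpler.

-- ===== PORT A =====
-- the for-loop over not_duplicated_nums with its two breaks, as structural recursion
def solutionLoop (l : Int) (xs : List Int) (dic : PySem.Dict Int Int) (res : Int) : Int :=
  match xs with
  | [] => res
  | e :: rest =>
    if l = res then res
    else if dic.contains e = false then solutionLoop l rest (dic.insert e 0) (res + 1)
    else res

def solution (nums : List Int) : Int :=
  solutionLoop ((nums.length / 2 : Nat) : Int) (PySem.Set.ofList nums) PySem.Dict.empty 0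

-- ===== PORT B =====
def solution_alt (nums : List Int) : Int :=
  min ((nums.length / 2 : Nat) : Int) (((PySem.Set.ofList nums).length : Nat) : Int)

-- ===== PRECONDITION & SPEC =====
def Spec_solution (nums : List Int) (out : Int) : Prop := out = solution_alt nums
instance (nums : List Int) (out : Int) : Decidable (Spec_solution nums out) := by unfold Spec_solution; infer_instance

-- ===== CLAIM (what is proved, stated in full; the proofs are below) =====
def Claim_equal_solution : Prop := ∀ (nums : List Int), Dom_solution nums → Spec_solution nums (solution nums)

-- ===== LEMMAS AND PROOFS =====
-- Invariant: on a duplicate-free list whose elements are absent from dic, with res ≤ l,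
-- the loop never hits the inner break and returns min l (res + |xs|).
theorem solutionLoop_min (xs : List Int) (l : Int) (dic : PySem.Dict Int Int) (res : Int)
    (hn : xs.Nodup) (hf : ∀ x ∈ xs, dic.contains x = false) (hle : res ≤ l) :
    solutionLoop l xs dic res = min l (res + xs.length) := by
  induction xs generalizing dic res with
  | nil => simp [solutionLoop]; omega
  | cons e rest ih =>
    rw [solutionLoop]
    by_cases hlr : l = res
    · simp only [if_pos hlr]
      simp only [List.length_cons]
      omega
    · simp only [if_neg hlr]
      have he : dic.contains e = false := hf e (by simp)
      rw [if_pos he]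
      rw [ih (dic.insert e 0) (res + 1) hn.of_cons
          (fun x hx => by
            rw [PySem.Dict.contains_insert]
            have hxe : x ≠ e := by
              intro h; exact (List.nodup_cons.mp hn).1 (h ▸ hx)
            simp [hxe, hf x (List.mem_cons_of_mem _ hx)])
          (by omega)]
      simp only [List.length_cons]
      omega

-- ===== VERDICT (by name: the statement is the Claim_ definition above) =====
theorem solution_spec : Claim_equal_solution := by
  intro nums _
  unfold Spec_solution solution solution_alt
  rw [solutionLoop_min _ _ _ _ (PySem.Set.nodup_ofList nums)
      (fun x _ => PySem.Dict.contains_empty x) (by positivity)]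
  omega
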